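-- pv_equiv track=rewrite | github.com/NICD-Wastewater-Genomics/Measles-Genomic-Surveillance-Paper | n450_tree/clean_seqs.py | remove_all_N_columns
-- ===== SOURCE A (Python) =====
-- def remove_all_N_columns(headers, seqs):
--     nseq = len(seqs)
--     L = len(seqs[0])
--
--     # Identify columns to keep (at least one non-N across seqs)
--     keep = []
--     for i in range(L):
--         col = [seqs[s][i] for s in range(nseq)]
--         if not all(c.upper() == "N" for c in col):
--             keep.append(i)
--
--     # Filter columns
--     filtered = []
--     for s in seqs:
--         filtered.append("".join(s[i] for i in keep))
--
--     return filtered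
-- ===== SOURCE B (Python) =====
-- def remove_all_N_columns(headers, seqs):
--     L = len(seqs[0])
--     # Row-major single pass: AND together a per-column "still all-N" boolean mask.
--     mask = [True] * L
--     for s in seqs:
--         mask = [m and c in "Nn" for m, c in zip(mask, s)]
--     # Emit each row, dropping the columns whose mask stayed set.
--     return ["".join(c for c, m in zip(s, mask) if not m) for s in seqs]
-- ===== Notes on version B (the rewrite author's own statement) =====
-- stated objective: alternative
-- what changed: B replaces A's column-major scan (building a keep-list of column indices, then per-row indexed joins) by a row-major single pass that ANDs together a per-column boolean 'still all-N' mask via zipWith over each row, then emits each row by zipping it with the mask and dropping masked positions; no column index list is ever built.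
-- outside the precondition, e.g. on remove_all_N_columns([], []): A raises IndexError, B raises IndexError; on remove_all_N_columns(['h'], ['AC', 'A']): A raises IndexError, B returns ['A', 'A']
import Mathlib
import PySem

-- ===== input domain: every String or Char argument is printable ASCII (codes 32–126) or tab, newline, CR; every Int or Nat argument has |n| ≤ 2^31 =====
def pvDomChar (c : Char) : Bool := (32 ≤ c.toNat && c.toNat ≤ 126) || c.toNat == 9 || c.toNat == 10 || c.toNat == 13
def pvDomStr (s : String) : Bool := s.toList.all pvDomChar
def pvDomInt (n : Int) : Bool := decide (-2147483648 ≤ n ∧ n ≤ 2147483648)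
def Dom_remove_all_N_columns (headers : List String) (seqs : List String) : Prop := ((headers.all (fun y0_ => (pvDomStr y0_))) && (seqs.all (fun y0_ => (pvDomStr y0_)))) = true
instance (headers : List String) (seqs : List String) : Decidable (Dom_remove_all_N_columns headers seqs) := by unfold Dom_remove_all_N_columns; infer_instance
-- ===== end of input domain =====

-- B replaces A's column-major keep-list-of-indices scan by a row-major pass ANDing a per-column
-- boolean all-N mask, then zips each row with the mask to emit it (alternative, same cost).

-- ===== PORT A =====
-- c.upper() == "N" for a single character c (exact on the ASCII domain)
def pvIsN (c : Char) : Bool := PySem.Chars.upperChar c == 'N'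

def remove_all_N_columns (headers : List String) (seqs : List String) : List String :=
  let nseq : Int := seqs.length
  let L : Int := (PySem.List.pyGetD seqs 0 "").toList.length
  -- for i in range(L): col = [seqs[s][i] ...]; if not all(...): keep.append(i)
  let keep : List Int := (PySem.List.pyRange 0 L 1).foldl (fun keep i =>
    let col : List Char := (PySem.List.pyRange 0 nseq 1).map (fun s =>
      PySem.List.pyGetD (PySem.List.pyGetD seqs s "").toList i ' ')
    if !(col.all pvIsN) then keep ++ [i] else keep) []
  -- for s in seqs: filtered.append("".join(s[i] for i in keep))
  seqs.foldl (fun filtered s =>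
    filtered ++ [String.mk (keep.map (fun i => PySem.List.pyGetD s.toList i ' '))]) []

-- ===== PORT B =====
def remove_all_N_columns_alt (headers : List String) (seqs : List String) : List String :=
  -- L = len(seqs[0])
  let L : Nat := (PySem.List.pyGetD seqs 0 "").toList.length
  -- mask = [True] * L
  let mask0 : List Bool := List.replicate L true
  -- for s in seqs: mask = [m and c in "Nn" for m, c in zip(mask, s)]
  let mask : List Bool := seqs.foldl (fun m s =>
    List.zipWith (fun mb c => mb && ("Nn".toList.contains c)) m s.toList) mask0
  -- return ["".join(c for c, m in zip(s, mask) if not m) for s in seqs]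
  seqs.map (fun s =>
    String.mk (((s.toList.zip mask).filter (fun p => !p.2)).map Prod.fst))

-- ===== PRECONDITION & SPEC =====
-- Pre_ excludes exactly the inputs where A raises IndexError: empty seqs (seqs[0]) and
-- rows shorter than the first row (seqs[s][i] for i < len(seqs[0])).
def Pre_remove_all_N_columns (headers : List String) (seqs : List String) : Prop :=
  seqs ≠ [] ∧ ∀ s ∈ seqs, (seqs.headD "").toList.length ≤ s.toList.length
instance (headers : List String) (seqs : List String) : Decidable (Pre_remove_all_N_columns headers seqs) := by unfold Pre_remove_all_N_columns; infer_instance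
def pvWitness_remove_all_N_columns : List String × List String := (["h1", "h2"], ["AN", "nN"])
def Spec_remove_all_N_columns (headers : List String) (seqs : List String) (out : List String) : Prop := out = remove_all_N_columns_alt headers seqs
instance (headers : List String) (seqs : List String) (out : List String) : Decidable (Spec_remove_all_N_columns headers seqs out) := by unfold Spec_remove_all_N_columns; infer_instance

-- ===== CLAIM (what is proved, stated in full; the proofs are below) =====
def Claim_equal_remove_all_N_columns : Prop := ∀ (headers : List String) (seqs : List String), Dom_remove_all_N_columns headers seqs → Pre_remove_all_N_columns headers seqs → Spec_remove_all_N_columns headers seqs (remove_all_N_columns headers seqs)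

-- ===== LEMMAS AND PROOFS =====

-- (Char.ofNat n).toNat = n on the uppercase range used below
theorem pv_ofNat_toNat (n : Nat) (h1 : 65 ≤ n) (h2 : n ≤ 90) : (Char.ofNat n).toNat = n := by
  have hv : n < 55296 ∨ 57343 < n ∧ n < 1114112 := by omega
  simp [Char.ofNat, hv, Char.ofNatAux, Char.toNat]

theorem pv_char_eq_of_toNat (a b : Char) (h : a.toNat = b.toNat) : a = b := by
  apply Char.ext
  exact UInt32.toNat_inj.mp h

-- B's membership test 'c in "Nn"' agrees with A's 'c.upper() == "N"' on every character
theorem pv_isN_eq (c : Char) : ("Nn".toList.contains c) = pvIsN c := by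
  have h : "Nn".toList = ['N', 'n'] := rfl
  simp only [h, pvIsN, PySem.Chars.upperChar, PySem.Chars.islower, List.contains_eq_any_beq,
    List.any_cons, List.any_nil, Bool.or_false]
  by_cases hl : ('a' ≤ c ∧ c ≤ 'z')
  · have h97 : 97 ≤ c.toNat := hl.1
    have h122 : c.toNat ≤ 122 := hl.2
    rw [if_pos (by simp [hl.1, hl.2])]
    have hofNat : (Char.ofNat (c.toNat - 32)).toNat = c.toNat - 32 :=
      pv_ofNat_toNat _ (by omega) (by omega)
    have hNc : (c == 'N') = false := by
      have : ('N' : Char).toNat = 78 := rfl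
      simp only [beq_eq_false_iff_ne, ne_eq]
      intro he; rw [he] at h97; simp at h97
    rw [hNc, Bool.false_or]
    by_cases hn : c = 'n'
    · subst hn; rfl
    · have h1 : (c == 'n') = false := by simp [hn]
      have h2 : (Char.ofNat (c.toNat - 32) == 'N') = false := by
        simp only [beq_eq_false_iff_ne, ne_eq]
        intro he
        have : (Char.ofNat (c.toNat - 32)).toNat = ('N' : Char).toNat := by rw [he]
        rw [hofNat] at this
        have hc : c.toNat = 110 := by
          have : ('N' : Char).toNat = 78 := rfl
          omega
        exact hn (pv_char_eq_of_toNat _ _ (by rw [hc]; rfl))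
      rw [h1, h2]
  · rw [if_neg (by simpa using hl)]
    have hnotn : (c == 'n') = false := by
      simp only [beq_eq_false_iff_ne, ne_eq]
      intro he
      exact hl (by rw [he]; exact ⟨by decide, by decide⟩)
    rw [hnotn, Bool.or_false]

theorem pv_map_range_getD {α β : Type} (xs : List α) (d : α) (g : α → β) :
    (List.range xs.length).map (fun k => g (xs.getD k d)) = xs.map g := by
  induction xs with
  | nil => simp
  | cons x xs ih =>
    simp only [List.length_cons, List.range_succ_eq_map, List.map_cons, List.map_map]
    exact congrArg _ (by simpa [Function.comp] using ih)

-- A's inner column comprehension, at a natural column index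
theorem pv_colA_eq (seqs : List String) (k : Nat) :
    (PySem.List.pyRange 0 (seqs.length : Int) 1).map (fun t =>
        PySem.List.pyGetD (PySem.List.pyGetD seqs t "").toList (k : Int) ' ')
      = (seqs.map String.toList).map (fun r => r.getD k ' ') := by
  rw [PySem.List.pyRange_zero_natCast, List.map_map]
  have h1 : ((fun t : Int =>
        PySem.List.pyGetD (PySem.List.pyGetD seqs t "").toList (k : Int) ' ')
        ∘ (fun n : Nat => (n : Int)))
      = (fun t : Nat => (fun s : String => s.toList.getD k ' ') (seqs.getD t "")) := by
    funext t
    simp [Function.comp, PySem.List.pyGetD_natCast]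
  rw [h1, pv_map_range_getD seqs "" (fun s => s.toList.getD k ' '), List.map_map]
  rfl

theorem pv_fold_keep (P : Int → Bool) (Q : Nat → Bool) (h : ∀ k : Nat, P (k : Int) = Q k) :
    ∀ (n : Nat) (init : List Int),
      (PySem.List.pyRange 0 (n : Int) 1).foldl
        (fun keep i => if P i then keep ++ [i] else keep) init
      = init ++ ((List.range n).filter Q).map Int.ofNat := by
  intro n
  induction n with
  | zero => intro init; simp [PySem.List.pyRange_one_eq_nil]
  | succ m ih =>
    intro init
    have hsp : ((m + 1 : Nat) : Int) = (m : Int) + 1 := by push_cast; ring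
    rw [hsp, PySem.List.pyRange_one_succ_right (by positivity), List.foldl_append, ih init]
    simp only [List.foldl_cons, List.foldl_nil, List.range_succ, List.filter_append,
      List.map_append]
    rw [h m]
    cases hq : Q m with
    | true => simp [hq, Int.ofNat_eq_natCast]
    | false => simp [hq]

-- getD of zipWith inside bounds
theorem pv_zipWith_getD (f : Bool → Char → Bool) (a : List Bool) (b : List Char) (k : Nat)
    (hk : k < a.length) (hb : a.length ≤ b.length) :
    (List.zipWith f a b).getD k false = f (a.getD k false) (b.getD k ' ') := by
  have hlen : (List.zipWith f a b).length = a.length := by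
    rw [List.length_zipWith]; omega
  rw [List.getD_eq_getElem _ _ (by omega), List.getD_eq_getElem _ _ hk,
    List.getD_eq_getElem _ _ (by omega), List.getElem_zipWith]

-- the mask fold over rows computes, per column, the AND of the initial mask and "all rows are N here"
theorem pv_mask_fold (rows : List (List Char)) :
    ∀ (init : List Bool), (∀ r ∈ rows, init.length ≤ r.length) →
    rows.foldl (fun m r => List.zipWith (fun mb c => mb && pvIsN c) m r) init
      = (List.range init.length).map
          (fun k => init.getD k false && rows.all (fun r => pvIsN (r.getD k ' '))) := by
  induction rows with
  | nil =>
    intro init _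
    simp only [List.foldl_nil, List.all_nil, Bool.and_true]
    exact (pv_map_range_getD init false id).symm.trans (by simp) |>.symm.trans (by simp) |>.symm
  | cons r rows ih =>
    intro init hlen
    have hr : init.length ≤ r.length := hlen r List.mem_cons_self
    set init' := List.zipWith (fun mb c => mb && pvIsN c) init r with hinit'
    have hlen' : init'.length = init.length := by
      rw [hinit', List.length_zipWith]; omega
    have hrec := ih init' (by
      intro r' hr'
      rw [hlen']
      exact hlen r' (List.mem_cons_of_mem _ hr'))
    rw [List.foldl_cons, hrec, hlen']
    apply List.map_congr_left
    intro k hk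
    have hkL : k < init.length := List.mem_range.mp hk
    rw [hinit', pv_zipWith_getD _ _ _ _ hkL hr]
    simp only [List.all_cons, Bool.and_assoc]

-- zipping a long-enough row with a range-map mask
theorem pv_zip_mask (s : List Char) (L : Nat) (f : Nat → Bool) (hs : L ≤ s.length) :
    s.zip ((List.range L).map f) = (List.range L).map (fun k => (s.getD k ' ', f k)) := by
  apply List.ext_getElem
  · rw [List.length_zip, List.length_map, List.length_range, List.length_map,
      List.length_range]
    omega
  · intro k h1 h2
    have hkL : k < L := by
      rw [List.length_zip, List.length_map, List.length_range] at h1; omega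
    rw [List.getElem_zip, List.getElem_map, List.getElem_map, List.getElem_range,
      List.getD_eq_getElem _ _ (by omega)]

theorem remove_all_N_columns_spec_aux (headers : List String) (seqs : List String)
    (hpre : Pre_remove_all_N_columns headers seqs) :
    remove_all_N_columns headers seqs = remove_all_N_columns_alt headers seqs := by
  obtain ⟨hne, hlen⟩ := hpre
  set rows := seqs.map String.toList with hrows
  set Ln : Nat := (seqs.headD "").toList.length with hLn
  have hL0 : (PySem.List.pyGetD seqs 0 "").toList.length = Ln := by
    cases seqs with
    | nil => exact absurd rfl hne
    | cons a l => simp [PySem.List.pyGetD_zero_cons, hLn]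
  set keepNat : List Nat := (List.range Ln).filter
      (fun k => !((rows.map (fun r => r.getD k ' ')).all pvIsN)) with hkeep
  -- ===== A reduces to the canonical form =====
  have hA : remove_all_N_columns headers seqs
      = seqs.map (fun s => String.mk (keepNat.map (fun k => s.toList.getD k ' '))) := by
    unfold remove_all_N_columns
    have hL : ((PySem.List.pyGetD seqs 0 "").toList.length : Int) = (Ln : Int) := by
      rw [hL0]
    rw [hL]
    rw [PySem.List.foldl_append_singleton_eq_map]
    have hkeepInt : (PySem.List.pyRange 0 (Ln : Int) 1).foldl (fun keep i =>
        if !(((PySem.List.pyRange 0 (seqs.length : Int) 1).map (fun t =>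
          PySem.List.pyGetD (PySem.List.pyGetD seqs t "").toList i ' ')).all pvIsN)
        then keep ++ [i] else keep) []
        = keepNat.map Int.ofNat := by
      have hpq : ∀ k : Nat,
          (!(((PySem.List.pyRange 0 (seqs.length : Int) 1).map (fun t =>
            PySem.List.pyGetD (PySem.List.pyGetD seqs t "").toList ((k : Nat) : Int) ' ')).all pvIsN))
          = !((rows.map (fun r => r.getD k ' ')).all pvIsN) := by
        intro k
        rw [pv_colA_eq seqs k, ← hrows]
      have h := pv_fold_keep
        (fun i => !(((PySem.List.pyRange 0 (seqs.length : Int) 1).map (fun t =>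
          PySem.List.pyGetD (PySem.List.pyGetD seqs t "").toList i ' ')).all pvIsN))
        (fun k => !((rows.map (fun r => r.getD k ' ')).all pvIsN)) hpq Ln []
      rw [List.nil_append, ← hkeep] at h
      exact h
    rw [hkeepInt]
    apply List.map_congr_left
    intro s _
    rw [List.map_map]
    congr 1
    apply List.map_congr_left
    intro k _
    simp only [Function.comp, Int.ofNat_eq_natCast, PySem.List.pyGetD_natCast]
  -- ===== B reduces to the canonical form =====
  have hlenrows : ∀ r ∈ rows, Ln ≤ r.length := by
    intro r hr
    obtain ⟨s, hs, rfl⟩ := List.mem_map.mp hr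
    exact hlen s hs
  have hB : remove_all_N_columns_alt headers seqs
      = seqs.map (fun s => String.mk (keepNat.map (fun k => s.toList.getD k ' '))) := by
    unfold remove_all_N_columns_alt
    rw [hL0]
    simp only [pv_isN_eq]
    -- the fold over seqs is the fold over rows
    have hfold : seqs.foldl (fun m s =>
        List.zipWith (fun mb c => mb && pvIsN c) m s.toList) (List.replicate Ln true)
        = rows.foldl (fun m r => List.zipWith (fun mb c => mb && pvIsN c) m r)
            (List.replicate Ln true) := by
      rw [hrows, List.foldl_map]
    rw [hfold, pv_mask_fold rows (List.replicate Ln true)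
      (by intro r hr; rw [List.length_replicate]; exact hlenrows r hr)]
    rw [List.length_replicate]
    have hmask : (List.range Ln).map (fun k =>
          (List.replicate Ln true).getD k false && rows.all (fun r => pvIsN (r.getD k ' ')))
        = (List.range Ln).map (fun k => rows.all (fun r => pvIsN (r.getD k ' '))) := by
      apply List.map_congr_left
      intro k hk
      have hkL : k < Ln := List.mem_range.mp hk
      rw [List.getD_eq_getElem _ _ (by simpa using hkL), List.getElem_replicate,
        Bool.true_and]
    rw [hmask]
    apply List.map_congr_left
    intro s hs
    congr 1
    rw [pv_zip_mask s.toList Ln _ (hlen s hs), List.filter_map, List.map_map]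
    have hfiltpred : ((fun p : Char × Bool => !p.2) ∘
          (fun k => (s.toList.getD k ' ', rows.all (fun r => pvIsN (r.getD k ' ')))))
        = (fun k => !((rows.map (fun r => r.getD k ' ')).all pvIsN)) := by
      funext k
      simp only [Function.comp_def, List.all_map]
    rw [hfiltpred, ← hkeep]
    rfl
  rw [hA, hB]

-- ===== VERDICT (by name: the statement is the Claim_ definition above) =====
theorem remove_all_N_columns_spec : Claim_equal_remove_all_N_columns := by
  intro headers seqs _ hpre
  exact remove_all_N_columns_spec_aux headers seqs hpre
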